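-- pv_equiv track=rewrite | github.com/Antony-Rya/programacao-estruturada-labs | main.py | contagem_letras
-- ===== SOURCE A (Python) =====
-- def contagem_letras(string):
--     '''
--     11-Escreva uma função em Python function que aceita uma string e
--     retorna a quantidade de letras maiúsculas e minúsculas.
--     '''
--     maisculas = 0
--     minusculas = 0
--     resultado = ()
--     for letra in string:
--         if letra.isupper():
--             maisculas += 1
--         else:
--             minusculas += 1
--     resultado = (maisculas, minusculas)
--     return resultado
-- ===== SOURCE B (Python) =====
-- def contagem_letras(string):
--     # Stage 1: build a character-frequency dictionary in one pass.
--     freq = {}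
--     for c in string:
--         freq[c] = freq.get(c, 0) + 1
--     # Stage 2: sum the multiplicities of the (few distinct) uppercase keys.
--     maisculas = 0
--     for c, n in freq.items():
--         if c.isupper():
--             maisculas += n
--     return (maisculas, len(string) - maisculas)
-- ===== Notes on version B (the rewrite author's own statement) =====
-- stated objective: alternative
-- what changed: B first builds a character-frequency dictionary in one pass, then obtains the uppercase count by summing the multiplicities of the distinct uppercase keys, deriving the other count as len(string) minus it, instead of A's per-character two-counter loop.
import Mathlib
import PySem

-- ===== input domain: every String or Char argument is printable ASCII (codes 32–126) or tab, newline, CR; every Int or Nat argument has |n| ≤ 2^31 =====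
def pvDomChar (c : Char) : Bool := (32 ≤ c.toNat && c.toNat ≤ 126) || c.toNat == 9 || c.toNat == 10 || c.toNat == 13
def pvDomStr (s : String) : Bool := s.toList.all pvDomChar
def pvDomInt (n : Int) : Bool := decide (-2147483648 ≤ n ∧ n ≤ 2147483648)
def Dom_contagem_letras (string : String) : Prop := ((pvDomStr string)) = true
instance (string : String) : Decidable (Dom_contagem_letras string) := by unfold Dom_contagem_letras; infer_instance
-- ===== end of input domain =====

-- B builds a character-frequency dictionary first, then sums the multiplicities of the uppercase keys (alternative decomposition).


-- ===== PORT A =====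
-- loop over the characters keeping both counters, as A does
def contagem_letras (string : String) : Int × Int :=
  let r := string.toList.foldl
    (fun (st : Int × Int) letra =>
      if PySem.Chars.isupper letra then (st.1 + 1, st.2) else (st.1, st.2 + 1))
    (0, 0)
  (r.1, r.2)

-- ===== PORT B =====
-- stage 1: frequency dict 'freq[c] = freq.get(c, 0) + 1'; stage 2: sum multiplicities of uppercase keys
def contagem_letras_alt (string : String) : Int × Int :=
  let freq := string.toList.foldl
    (fun (d : PySem.Dict Char Int) c => d.insert c (d.getD c 0 + 1)) PySem.Dict.empty
  let maisculas := freq.items.foldl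
    (fun (acc : Int) (p : Char × Int) => if PySem.Chars.isupper p.1 then acc + p.2 else acc) 0
  (maisculas, (PySem.Str.len string : Int) - maisculas)

-- ===== PRECONDITION & SPEC =====
def Spec_contagem_letras (string : String) (out : Int × Int) : Prop := out = contagem_letras_alt string
instance (string : String) (out : Int × Int) : Decidable (Spec_contagem_letras string out) := by unfold Spec_contagem_letras; infer_instance

-- ===== CLAIM =====
def Claim_equal_contagem_letras : Prop := ∀ (string : String), Dom_contagem_letras string → Spec_contagem_letras string (contagem_letras string)

-- ===== LEMMAS AND PROOFS =====
-- A's two-counter loop computes (countP isupper, length - countP isupper)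
lemma contagem_foldl (l : List Char) (a b : Int) :
    l.foldl (fun (st : Int × Int) letra =>
      if PySem.Chars.isupper letra then (st.1 + 1, st.2) else (st.1, st.2 + 1)) (a, b)
    = (a + (l.countP (fun c => PySem.Chars.isupper c) : Int),
       b + ((l.length : Int) - (l.countP (fun c => PySem.Chars.isupper c) : Int))) := by
  induction l generalizing a b with
  | nil => simp
  | cons c t ih =>
    simp only [List.foldl_cons, List.countP_cons, List.length_cons]
    by_cases h : PySem.Chars.isupper c = true
    · simp [h, ih, Prod.ext_iff]; omega
    · simp [h, ih, Prod.ext_iff]; omega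

-- the guarded accumulation over (key, mult) pairs is a sum of guarded multiplicities
lemma foldl_if_add (l : List (Char × Int)) (a : Int) :
    l.foldl (fun (acc : Int) (p : Char × Int) =>
      if PySem.Chars.isupper p.1 then acc + p.2 else acc) a
    = a + (l.map (fun p => if PySem.Chars.isupper p.1 then p.2 else 0)).sum := by
  induction l generalizing a with
  | nil => simp
  | cons p t ih =>
    by_cases h : PySem.Chars.isupper p.1 = true <;> (simp [h, ih]; try ring)

lemma sum_map_zero (t : List Char) (f : Char → Int) (hz : ∀ k ∈ t, f k = 0) :
    (t.map f).sum = 0 := by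
  induction t with
  | nil => simp
  | cons u v ih =>
    simp [hz u (by simp)]
    exact ih (fun k hk => hz k (List.mem_cons_of_mem _ hk))

-- a map that is zero except at one element of a nodup list sums to its value there
lemma sum_map_single (ds : List Char) (hnd : ds.Nodup) (x : Char) (hx : x ∈ ds)
    (f : Char → Int) (hf : ∀ k, k ≠ x → f k = 0) :
    (ds.map f).sum = f x := by
  induction ds with
  | nil => cases hx
  | cons d t ih =>
    rcases List.mem_cons.mp hx with h | h
    · subst h
      have hz : ∀ k ∈ t, f k = 0 := by
        intro k hk
        exact hf k (by rintro rfl; exact (List.nodup_cons.mp hnd).1 hk)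
      simp [sum_map_zero t f hz]
    · have hd : f d = 0 := hf d (by rintro rfl; exact (List.nodup_cons.mp hnd).1 h)
      simp [hd, ih (List.nodup_cons.mp hnd).2 h]

-- summing the guarded multiplicities over any nodup list covering xs gives countP
lemma sum_counts (xs : List Char) (ds : List Char) (hnd : ds.Nodup)
    (hsub : ∀ x ∈ xs, x ∈ ds) :
    (ds.map (fun k => if PySem.Chars.isupper k then (xs.count k : Int) else 0)).sum
    = (xs.countP (fun c => PySem.Chars.isupper c) : Int) := by
  induction xs with
  | nil => simp
  | cons x t ih =>
    have hmem : x ∈ ds := hsub x (by simp)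
    have hsub' : ∀ y ∈ t, y ∈ ds := fun y hy => hsub y (List.mem_cons_of_mem _ hy)
    have hsplit :
        (ds.map (fun k => if PySem.Chars.isupper k then ((x :: t).count k : Int) else 0)).sum
        = (ds.map (fun k => if PySem.Chars.isupper k then (t.count k : Int) else 0)).sum
          + (ds.map (fun k => if PySem.Chars.isupper k ∧ k = x then (1 : Int) else 0)).sum := by
      rw [← List.sum_map_add]
      refine congrArg _ (List.map_congr_left ?_)
      intro k _
      by_cases he : k = x
      · subst he
        by_cases hu : PySem.Chars.isupper k = true <;> simp [hu]
      · by_cases hu : PySem.Chars.isupper k = true <;>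
          · simp [hu, List.count_cons, he]
            try exact fun h => he h.symm
    have hone :
        (ds.map (fun k => if PySem.Chars.isupper k ∧ k = x then (1 : Int) else 0)).sum
        = if PySem.Chars.isupper x then (1 : Int) else 0 := by
      rw [sum_map_single ds hnd x hmem _ (by intro k hk; simp [hk])]
      by_cases hu : PySem.Chars.isupper x = true <;> simp [hu]
    rw [hsplit, ih hsub', hone, List.countP_cons]
    by_cases hu : PySem.Chars.isupper x = true <;> simp [hu]

-- ===== VERDICT =====
theorem contagem_letras_spec : Claim_equal_contagem_letras := by
  intro s _
  unfold Spec_contagem_letras contagem_letras contagem_letras_alt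
  simp only [PySem.Dict.foldl_insert_getD_add_one_eq_counter, contagem_foldl,
    PySem.Dict.items_counter, foldl_if_add]
  have := sum_counts s.toList (PySem.Set.ofList s.toList)
    (PySem.Set.nodup_ofList s.toList) (fun x hx => (PySem.Set.mem_ofList _ _).mpr hx)
  simp only [List.map_map]
  have hcomp :
      ((PySem.Set.ofList s.toList).map
        ((fun p : Char × Int => if PySem.Chars.isupper p.1 then p.2 else 0)
          ∘ (fun k => (k, (s.toList.count k : Int))))).sum
      = ((PySem.Set.ofList s.toList).map
          (fun k => if PySem.Chars.isupper k then (s.toList.count k : Int) else 0)).sum := by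
    congr 1
  rw [hcomp, this]
  simp [PySem.Str.len_eq]
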